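-- pv_equiv track=rewrite | github.com/DSD-DBS/py-capellambse | capellambse/helpers.py | split_links
-- ===== SOURCE A (Python) =====
-- import collections.abc as cabc
--
-- def split_links(links: str) -> cabc.Iterator[str]:
--     """Split a string containing intra- and inter-fragment links.
--
--     Intra-fragment links are simply "#UUID", whereas inter-fragment
--     links look like "xtype fragment#UUID". Multiple such links are
--     space-separated in a single long string to form a list. This
--     function splits such a string back into its individual components
--     (each being either an intra- or inter-fragment link), and yields
--     them.
--
--     Yields
--     ------
--     str
--         A single link from the list.
--     """
--     next_xtype = ""
--     for part in links.split():
--         if "#" in part: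
--             if next_xtype:
--                 yield f"{next_xtype} {part}"
--             else:
--                 yield part
--             next_xtype = ""
--
--         else:
--             if next_xtype:
--                 raise ValueError(f"Malformed link definition: {links}")
--             next_xtype = part
-- ===== SOURCE B (Python) =====
-- def split_links(links):
--     """Split a string of intra-/inter-fragment links (lookahead version)."""
--     tokens = links.split()
--     n = len(tokens)
--     i = 0
--     while i < n:
--         tok = tokens[i]
--         if "#" in tok:
--             yield tok
--             i += 1
--         elif i + 1 < n:
--             nxt = tokens[i + 1]
--             if "#" in nxt:
--                 yield f"{tok} {nxt}"
--                 i += 2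
--             else:
--                 raise ValueError(f"Malformed link definition: {links}")
--         else:
--             # trailing prefix-only token: nothing to pair it with
--             return
-- ===== Notes on version B (the rewrite author's own statement) =====
-- stated objective: alternative
-- what changed: Replaced A's forward-carried next_xtype state variable with an explicit-index loop that looks ahead two tokens at a time over links.split().
import Mathlib
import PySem

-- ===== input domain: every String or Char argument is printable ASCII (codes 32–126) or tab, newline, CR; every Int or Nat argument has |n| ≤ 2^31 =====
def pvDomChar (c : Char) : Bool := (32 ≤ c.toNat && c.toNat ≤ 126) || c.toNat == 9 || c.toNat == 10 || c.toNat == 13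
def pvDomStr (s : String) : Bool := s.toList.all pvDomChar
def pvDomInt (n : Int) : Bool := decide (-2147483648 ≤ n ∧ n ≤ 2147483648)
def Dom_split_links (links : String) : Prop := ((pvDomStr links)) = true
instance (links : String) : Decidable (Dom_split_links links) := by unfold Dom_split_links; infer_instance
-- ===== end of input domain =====

-- B replaces A's carried `next_xtype` state with index look-ahead over the token list (alternative decomposition, same cost).
-- Both versions raise ValueError on two adjacent '#'-free tokens; those inputs are outside Pre_.

-- ===== PORT A =====
-- A's generator loop: state `nx` carries a pending xtype prefix; on a raise the port stops (input outside Pre_).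
def splitLinksGoA : List (List Char) → List Char → List (List Char)
  | [], _ => []
  | p :: ts, nx =>
    if PySem.Chars.isIn ['#'] p then
      (if nx ≠ [] then nx ++ [' '] ++ p else p) :: splitLinksGoA ts []
    else
      if nx ≠ [] then []  -- raise ValueError (excluded by Pre_)
      else splitLinksGoA ts p

def split_links (links : String) : List String :=
  (splitLinksGoA (PySem.Chars.split₀ links.toList) []).map String.ofList

-- ===== PORT B =====
-- B's loop: explicit index over the tokens = structural recursion with two-token look-ahead.
def splitLinksGoB : List (List Char) → List (List Char)
  | [] => []
  | [p] => if PySem.Chars.isIn ['#'] p then [p] else []  -- dangling prefix token dropped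
  | p :: q :: ts =>
    if PySem.Chars.isIn ['#'] p then p :: splitLinksGoB (q :: ts)
    else
      if PySem.Chars.isIn ['#'] q then (p ++ [' '] ++ q) :: splitLinksGoB ts
      else []  -- raise ValueError (excluded by Pre_)

def split_links_alt (links : String) : List String :=
  (splitLinksGoB (PySem.Chars.split₀ links.toList)).map String.ofList

-- ===== PRECONDITION & SPEC =====
-- Pre_ excludes exactly the inputs with two adjacent whitespace-separated tokens both lacking '#',
-- on which Python A (and B) raises ValueError.
def Pre_split_links (links : String) : Prop :=
  List.IsChain (fun a b => (PySem.Str.isIn "#" a || PySem.Str.isIn "#" b) = true)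
    (PySem.Str.split₀ links)
instance (links : String) : Decidable (Pre_split_links links) := by
  unfold Pre_split_links; infer_instance

def pvWitness_split_links : String := "xtype frag#u1 #u2"

def Spec_split_links (links : String) (out : List String) : Prop := out = split_links_alt links
instance (links : String) (out : List String) : Decidable (Spec_split_links links out) := by unfold Spec_split_links; infer_instance

-- ===== CLAIM (what is proved, stated in full; the proofs are below) =====
def Claim_equal_split_links : Prop := ∀ (links : String), Dom_split_links links → Pre_split_links links → Spec_split_links links (split_links links)

-- ===== LEMMAS AND PROOFS =====

-- tokens produced by split() are never empty (invariant of split₀.go)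
lemma split₀_go_ne_nil : ∀ (s cur : List Char) (acc : List (List Char)),
    (∀ t ∈ acc, t ≠ []) → ∀ t ∈ PySem.Chars.split₀.go s cur acc, t ≠ [] := by
  intro s
  induction s with
  | nil =>
    intro cur acc hacc t ht
    simp only [PySem.Chars.split₀.go] at ht
    split at ht
    · exact hacc t (by simpa using ht)
    · rcases (by simpa using ht : t ∈ acc ∨ t = cur.reverse) with h | h
      · exact hacc t h
      · subst h
        simp_all [List.isEmpty_iff]
  | cons c rest ih =>
    intro cur acc hacc t ht
    simp only [PySem.Chars.split₀.go] at ht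
    split at ht
    · split at ht
      · exact ih [] acc hacc t ht
      · refine ih [] (cur.reverse :: acc) ?_ t ht
        intro u hu
        rcases hu with _ | hu
        · simp_all [List.isEmpty_iff]
        · exact hacc u (by assumption)
    · exact ih (c :: cur) acc hacc t ht

lemma split₀_ne_nil (s : List Char) : ∀ t ∈ PySem.Chars.split₀ s, t ≠ [] :=
  split₀_go_ne_nil s [] [] (by simp)

-- the core equivalence on token lists: nonempty tokens + no two adjacent '#'-free tokens
lemma goA_eq_goB : ∀ ts : List (List Char), (∀ t ∈ ts, t ≠ []) →
    List.IsChain (fun a b => (PySem.Chars.isIn ['#'] a || PySem.Chars.isIn ['#'] b) = true) ts →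
    splitLinksGoA ts [] = splitLinksGoB ts := by
  intro ts
  induction ts using splitLinksGoB.induct with
  | case1 => intro _ _; rfl
  | case2 p hp =>
    intro _ _
    simp [splitLinksGoA, splitLinksGoB, hp]
  | case3 p hp =>
    intro _ _
    simp [splitLinksGoA, splitLinksGoB, hp]
  | case4 p q ts hp ih =>
    intro hne hch
    have hA : splitLinksGoA (p :: q :: ts) [] = p :: splitLinksGoA (q :: ts) [] := by
      rw [splitLinksGoA.eq_def]; simp [hp]
    have hB : splitLinksGoB (p :: q :: ts) = p :: splitLinksGoB (q :: ts) := by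
      rw [splitLinksGoB.eq_def]; simp [hp]
    rw [hA, hB, ih (fun t ht => hne t (by simp [ht])) hch.tail]
  | case5 p q ts hp hq ih =>
    intro hne hch
    have hpne : p ≠ [] := hne p (by simp)
    have hA1 : splitLinksGoA (p :: q :: ts) [] = splitLinksGoA (q :: ts) p := by
      rw [splitLinksGoA.eq_def]; simp [hp]
    have hA2 : splitLinksGoA (q :: ts) p = (p ++ [' '] ++ q) :: splitLinksGoA ts [] := by
      rw [splitLinksGoA.eq_def]; simp [hq, hpne]
    have hB : splitLinksGoB (p :: q :: ts) = (p ++ [' '] ++ q) :: splitLinksGoB ts := by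
      rw [splitLinksGoB.eq_def]; simp [hp, hq]
    rw [hA1, hA2, hB, ih (fun t ht => hne t (by simp [ht])) hch.tail.tail]
  | case6 p q ts hp hq =>
    intro hne hch
    have := hch.rel
    simp [hp, hq] at this

-- ===== VERDICT (by name: the statement is the Claim_ definition above) =====
theorem split_links_spec : Claim_equal_split_links := by
  intro links _ hpre
  unfold Spec_split_links split_links split_links_alt
  congr 1
  apply goA_eq_goB
  · exact split₀_ne_nil links.toList
  · unfold Pre_split_links PySem.Str.split₀ at hpre
    rw [List.isChain_map] at hpre
    refine hpre.imp ?_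
    intro a b hab
    simpa [PySem.Str.isIn] using hab
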